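-- pv_equiv track=rewrite | github.com/rbhoot/us_census_tools | common_utils/helper_functions.py | get_columns_by_token_count
-- ===== SOURCE A (Python) =====
-- def get_columns_by_token_count(column_list, delimiter='!!'):
--   ret_dict = {}
--   for cur_column in column_list:
--     token_list = cur_column.split(delimiter)
--     if len(token_list) not in ret_dict:
--       ret_dict[len(token_list)] = []
--     ret_dict[len(token_list)].append(cur_column)
--   return ret_dict
-- ===== SOURCE B (Python) =====
-- def get_columns_by_token_count(column_list, delimiter='!!'):
--   counts = [len(c.split(delimiter)) for c in column_list]
--   ret_dict = {}
--   for k in dict.fromkeys(counts):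
--     ret_dict[k] = [c for c, n in zip(column_list, counts) if n == k]
--   return ret_dict
-- ===== Notes on version B (the rewrite author's own statement) =====
-- stated objective: alternative
-- what changed: Replaces the running-dict single pass (membership test + per-item append) with a two-phase grouping: precompute all token counts once, dedup them in first-occurrence order, and build each group by one filtering pass per distinct count.
import Mathlib
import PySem

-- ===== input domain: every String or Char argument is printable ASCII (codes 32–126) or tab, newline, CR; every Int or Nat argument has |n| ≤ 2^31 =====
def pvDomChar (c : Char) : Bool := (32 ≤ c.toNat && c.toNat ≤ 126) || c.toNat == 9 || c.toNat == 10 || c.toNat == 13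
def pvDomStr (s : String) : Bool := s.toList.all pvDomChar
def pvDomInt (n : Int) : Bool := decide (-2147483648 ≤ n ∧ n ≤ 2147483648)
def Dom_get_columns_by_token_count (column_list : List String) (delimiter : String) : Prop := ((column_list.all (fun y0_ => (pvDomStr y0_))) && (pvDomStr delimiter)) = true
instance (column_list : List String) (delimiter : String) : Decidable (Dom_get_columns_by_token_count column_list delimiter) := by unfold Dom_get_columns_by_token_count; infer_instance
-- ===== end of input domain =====

-- B groups by a precomputed token-count list (dedup in first-occurrence order, then one filter per
-- distinct count), instead of A's running dict with membership test and per-item append: same dict.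

-- ===== PORT A =====
-- token count of one column: len(cur_column.split(delimiter)); the getD [] arm is unreachable under Pre_ (delimiter ≠ "")
def pvTokCount (delimiter cur_column : String) : Int :=
  (((PySem.Str.split? cur_column delimiter).getD []).length : Int)

def get_columns_by_token_count (column_list : List String) (delimiter : String) : List (Int × List String) :=
  (column_list.foldl (fun ret_dict cur_column =>
      let n := pvTokCount delimiter cur_column
      let ret_dict := if ret_dict.contains n then ret_dict else ret_dict.insert n []
      ret_dict.insert n (ret_dict.getD n [] ++ [cur_column]))
    PySem.Dict.empty).items

-- ===== PORT B =====
def get_columns_by_token_count_alt (column_list : List String) (delimiter : String) : List (Int × List String) :=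
  let counts : List Int := column_list.map (fun c => pvTokCount delimiter c)
  let ret_dict := (PySem.List.dedup counts).foldl
    (fun ret_dict k =>
      ret_dict.insert k (((column_list.zip counts).filter (fun p => p.2 == k)).map (·.1)))
    PySem.Dict.empty
  ret_dict.items

-- ===== PRECONDITION & SPEC =====
-- Pre_ excludes only delimiter = "" with a nonempty column_list, exactly where Python's str.split raises ValueError in both A and B.
def Pre_get_columns_by_token_count (column_list : List String) (delimiter : String) : Prop := delimiter ≠ "" ∨ column_list = []
instance (column_list : List String) (delimiter : String) : Decidable (Pre_get_columns_by_token_count column_list delimiter) := by unfold Pre_get_columns_by_token_count; infer_instance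

def pvWitness_get_columns_by_token_count : List String × String := (["a!!b", "c", "d!!e!!f", "g!!h"], "!!")

def Spec_get_columns_by_token_count (column_list : List String) (delimiter : String) (out : List (Int × List String)) : Prop := out = get_columns_by_token_count_alt column_list delimiter
instance (column_list : List String) (delimiter : String) (out : List (Int × List String)) : Decidable (Spec_get_columns_by_token_count column_list delimiter out) := by unfold Spec_get_columns_by_token_count; infer_instance

-- ===== CLAIM (what is proved, stated in full; the proofs are below) =====
def Claim_equal_get_columns_by_token_count : Prop := ∀ (column_list : List String) (delimiter : String), Dom_get_columns_by_token_count column_list delimiter → Pre_get_columns_by_token_count column_list delimiter → Spec_get_columns_by_token_count column_list delimiter (get_columns_by_token_count column_list delimiter)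

-- ===== LEMMAS AND PROOFS =====

-- A's loop body (setdefault-style insert of [] then overwrite with the appended list) is d.modify k [] (· ++ [c])
theorem pv_bodyA_eq_modify (d : PySem.Dict Int (List String)) (n : Int) (c : String) :
    (let d' := if d.contains n then d else d.insert n []
     d'.insert n (d'.getD n [] ++ [c])) = d.modify n [] (· ++ [c]) := by
  by_cases h : d.contains n = true
  · simp [h, PySem.Dict.modify]
  · have hg : d.getD n [] = [] := by
      have := (PySem.Dict.get?_eq_none_iff_contains (d := d) (k := n)).mpr (by simpa using h)
      simp [PySem.Dict.getD, this]
    simp [h, PySem.Dict.modify, PySem.Dict.getD_insert_self, PySem.Dict.insert_insert_self, hg]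

-- the map-filter-map of A's pairs list is a plain filter of the columns
theorem pv_groupA_eq (xs : List String) (f : String → Int) (k : Int) :
    ((xs.map (fun c => (f c, c))).filter (fun p => p.1 == k)).map (·.2)
      = xs.filter (fun c => f c == k) := by
  induction xs with
  | nil => rfl
  | cons x xs ih =>
    simp only [List.map_cons, List.filter_cons]
    by_cases h : f x = k
    · simp [h, ih]
    · simp [h, ih]

-- group extraction agrees: filtering the zip by count equals filtering the columns by their count
theorem pv_group_eq (xs : List String) (f : String → Int) (k : Int) :
    ((xs.zip (xs.map f)).filter (fun p => p.2 == k)).map (·.1)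
      = xs.filter (fun c => f c == k) := by
  induction xs with
  | nil => rfl
  | cons x xs ih =>
    simp only [List.map_cons, List.zip_cons_cons, List.filter_cons]
    by_cases h : f x = k
    · simp [h, ih]
    · simp [h, ih]

-- ===== VERDICT (by name: the statement is the Claim_ definition above) =====
theorem get_columns_by_token_count_spec : Claim_equal_get_columns_by_token_count := by
  intro xs delim _ _
  unfold Spec_get_columns_by_token_count get_columns_by_token_count get_columns_by_token_count_alt
  set f := pvTokCount delim with hf
  -- A's fold is the modify-form fold
  have hstep : (fun (ret_dict : PySem.Dict Int (List String)) cur_column =>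
      let n := f cur_column
      let ret_dict := if ret_dict.contains n then ret_dict else ret_dict.insert n []
      ret_dict.insert n (ret_dict.getD n [] ++ [cur_column]))
      = fun d c => d.modify (f c) [] (· ++ [c]) := by
    funext d c
    exact pv_bodyA_eq_modify d (f c) c
  rw [hstep]
  set dA := xs.foldl (fun d c => d.modify (f c) [] (· ++ [c])) PySem.Dict.empty with hdA
  -- keys of dA: distinct counts in first-occurrence order
  have hkeys : dA.keys = PySem.List.dedup (xs.map f) := by
    rw [hdA, PySem.Dict.keys_foldl_modify_key]
    simp [PySem.Set.update_nil_left, PySem.List.dedup_eq_ofList]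
  have hnd : dA.keys.Nodup := by
    rw [hdA]
    exact PySem.Dict.nodup_keys_foldl_modify_key _ _ _ _ _ PySem.Dict.nodup_keys_empty
  -- every group of dA
  have hgetD : ∀ k : Int, dA.getD k [] = xs.filter (fun c => f c == k) := by
    intro k
    have hm : List.foldl (fun d c => d.modify (f c) [] (· ++ [c])) PySem.Dict.empty xs
        = List.foldl (fun d (p : Int × String) => d.modify p.1 [] (· ++ [p.2]))
            PySem.Dict.empty (xs.map (fun c => (f c, c))) := by
      rw [List.foldl_map]
    rw [hdA, hm, PySem.Dict.getD_foldl_modify_append]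
    rw [pv_groupA_eq]
    simp [PySem.Dict.getD, PySem.Dict.get?, PySem.Dict.empty]
  -- B's fold over fresh distinct keys appends its groups
  have hB : ((PySem.List.dedup (xs.map f)).foldl
      (fun d k => d.insert k (((xs.zip (xs.map f)).filter (fun p => p.2 == k)).map (·.1)))
      PySem.Dict.empty).items
      = (PySem.List.dedup (xs.map f)).map
          (fun k => (k, ((xs.zip (xs.map f)).filter (fun p => p.2 == k)).map (·.1))) := by
    rw [PySem.Dict.items_foldl_insert_fresh (k := fun x => x)]
    · simp [PySem.Dict.empty]
    · intro a _
      rfl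
    · simp
  rw [hB]
  rw [PySem.Dict.items_eq_map_keys dA hnd []]
  rw [hkeys]
  apply List.map_congr_left
  intro k _
  rw [hgetD k, pv_group_eq]
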